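-- pv_equiv track=rewrite | github.com/typebotjota/sales-analytics-carros | parse_whatsapp.py | _identify_roles
-- ===== SOURCE A (Python) =====
-- from collections import defaultdict
--
-- def _identify_roles(messages):
--     """
--     Vendedor = participante com maior score.
--     Score = (msgs longas > 50 chars) * 2 + total de msgs.
--     Lógica: vendedores tendem a enviar mensagens mais elaboradas.
--     """
--     stats = defaultdict(lambda: {'total': 0, 'long': 0})
--     for msg in messages:
--         s = msg['sender']
--         stats[s]['total'] += 1
--         if len(msg['text']) > 50:
--             stats[s]['long'] += 1
--
--     senders = list(stats.keys())
--     if len(senders) < 2: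
--         return senders[0], senders[0]
--
--     scores = {s: v['long'] * 2 + v['total'] for s, v in stats.items()}
--     ranked = sorted(scores, key=scores.get, reverse=True)
--     return ranked[0], ranked[1]
-- ===== SOURCE B (Python) =====
-- def _identify_roles(messages):
--     # One pass accumulating the score directly (+1 per message, +2 extra if long),
--     # then a single top-2 scan over insertion order instead of building a stats
--     # dict, a scores dict and sorting.
--     score = {}
--     for msg in messages:
--         s = msg['sender']
--         score[s] = score.get(s, 0) + (3 if len(msg['text']) > 50 else 1)
--     items = iter(score.items())
--     best_s, best = next(items)
--     second_s = None
--     second = 0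
--     for s, v in items:
--         if v > best:
--             second_s, second = best_s, best
--             best_s, best = s, v
--         elif second_s is None or v > second:
--             second_s, second = s, v
--     if second_s is None:
--         return best_s, best_s
--     return best_s, second_s
-- ===== Notes on version B (the rewrite author's own statement) =====
-- stated objective: alternative
-- what changed: B accumulates each sender's score directly in one dict pass (+1 per message, +2 extra if long) and then finds the top two senders with a single strict-comparison best/second scan over insertion order, instead of building a stats dict, deriving a scores dict and stable-sorting the senders.
import Mathlib
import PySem

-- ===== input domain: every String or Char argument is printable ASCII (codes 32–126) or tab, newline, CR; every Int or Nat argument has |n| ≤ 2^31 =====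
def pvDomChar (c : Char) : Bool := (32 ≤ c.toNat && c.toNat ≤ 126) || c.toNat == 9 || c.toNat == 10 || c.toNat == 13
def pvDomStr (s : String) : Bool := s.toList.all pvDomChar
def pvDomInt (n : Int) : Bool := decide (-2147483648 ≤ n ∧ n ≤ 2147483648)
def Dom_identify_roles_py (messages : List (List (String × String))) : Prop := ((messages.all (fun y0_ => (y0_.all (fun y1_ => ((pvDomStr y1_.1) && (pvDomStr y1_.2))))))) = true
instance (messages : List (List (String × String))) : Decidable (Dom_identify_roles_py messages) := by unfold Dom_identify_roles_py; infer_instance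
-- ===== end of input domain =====

-- B replaces A's stats-dict + scores-dict + stable reverse sort by a single score
-- accumulation pass and a strict-comparison best/second scan (alternative decomposition).


-- ===== PORT A =====
-- msg['sender'] / msg['text'] : first-match association-list lookup; Pre_ guarantees the key
-- is present, so the `getD ""` default is never used on admitted inputs (Python raises KeyError there).
def identify_roles_py (messages : List (List (String × String))) : String × String :=
  let stats : PySem.Dict String (Int × Int) :=
    messages.foldl (fun st msg =>
      let s := ((PySem.Dict.mk msg).get? "sender").getD ""
      let st1 := st.modify s (0, 0) (fun p => (p.1 + 1, p.2))
      if PySem.Str.len (((PySem.Dict.mk msg).get? "text").getD "") > 50 then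
        st1.modify s (0, 0) (fun p => (p.1, p.2 + 1))
      else st1) PySem.Dict.empty
  let senders := stats.keys
  if senders.length < 2 then
    (PySem.List.pyGetD senders 0 "", PySem.List.pyGetD senders 0 "")
  else
    let scores : PySem.Dict String Int :=
      stats.items.foldl (fun d p => d.insert p.1 (p.2.2 * 2 + p.2.1)) PySem.Dict.empty
    let ranked := PySem.List.sorted scores.keys (fun s => scores.getD s 0) true
    (PySem.List.pyGetD ranked 0 "", PySem.List.pyGetD ranked 1 "")

-- ===== PORT B =====
-- port of Source B: one accumulation pass, then a best/second scan over insertion order.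
def identify_roles_py_alt (messages : List (List (String × String))) : String × String :=
  let score : PySem.Dict String Int :=
    messages.foldl (fun d msg =>
      let s := ((PySem.Dict.mk msg).get? "sender").getD ""
      d.insert s (d.getD s 0 +
        (if PySem.Str.len (((PySem.Dict.mk msg).get? "text").getD "") > 50 then 3 else 1)))
      PySem.Dict.empty
  match score.items with
  | [] => ("", "")  -- B's Python raises StopIteration here (excluded by Pre_)
  | (bs0, bv0) :: rest =>
    let r := rest.foldl
      (fun (st : String × Int × Option (String × Int)) p =>
        if p.2 > st.2.1 then (p.1, p.2, some (st.1, st.2.1))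
        else
          match st.2.2 with
          | none => (st.1, st.2.1, some p)
          | some (_, sv) => if p.2 > sv then (st.1, st.2.1, some p) else st)
      (bs0, bv0, none)
    match r.2.2 with
    | none => (r.1, r.1)
    | some (ss, _) => (r.1, ss)

-- ===== PRECONDITION & SPEC =====
-- Pre_ excludes exactly the inputs on which the Python A raises: the empty message list
-- (IndexError on senders[0]) and messages missing a 'sender' or 'text' key (KeyError).
def Pre_identify_roles_py (messages : List (List (String × String))) : Prop :=
  messages ≠ [] ∧ ∀ msg ∈ messages,
    ((PySem.Dict.mk msg).get? "sender").isSome ∧ ((PySem.Dict.mk msg).get? "text").isSome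
instance (messages : List (List (String × String))) : Decidable (Pre_identify_roles_py messages) := by
  unfold Pre_identify_roles_py; infer_instance
def pvWitness_identify_roles_py : (List (List (String × String))) :=
  [[("sender", "ana"), ("text", "hi")], [("sender", "bob"), ("text", "ok")]]
def Spec_identify_roles_py (messages : List (List (String × String))) (out : String × String) : Prop := out = identify_roles_py_alt messages
instance (messages : List (List (String × String))) (out : String × String) : Decidable (Spec_identify_roles_py messages out) := by unfold Spec_identify_roles_py; infer_instance

-- ===== CLAIM (what is proved, stated in full; the proofs are below) =====
def Claim_equal_identify_roles_py : Prop := ∀ (messages : List (List (String × String))), Dom_identify_roles_py messages → Pre_identify_roles_py messages → Spec_identify_roles_py messages (identify_roles_py messages)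

-- ===== LEMMAS AND PROOFS =====

-- value map between A's per-sender (total, long) stats and B's accumulated score
def pvVal (v : Int × Int) : Int := v.2 * 2 + v.1
def pvG (p : String × (Int × Int)) : String × Int := (p.1, pvVal p.2)

theorem pv_contains_map (its : List (String × (Int × Int))) (s : String) :
    (PySem.Dict.mk (its.map pvG)).contains s = (PySem.Dict.mk its).contains s := by
  simp only [PySem.Dict.contains, List.any_map]
  rfl

theorem pv_get?_map (its : List (String × (Int × Int))) (s : String) :
    (PySem.Dict.mk (its.map pvG)).get? s = ((PySem.Dict.mk its).get? s).map pvVal := by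
  induction its with
  | nil => rfl
  | cons p t ih =>
    rw [List.map_cons, PySem.Dict.get?_mk_cons, PySem.Dict.get?_mk_cons]
    by_cases h : p.1 = s
    · simp [pvG, h]
    · simp [pvG, h, ih]

theorem pv_getD_map (st : PySem.Dict String (Int × Int)) (d : PySem.Dict String Int)
    (h : d.items = st.items.map pvG) (s : String) :
    d.getD s 0 = pvVal (st.getD s (0, 0)) := by
  have hd : d = PySem.Dict.mk (st.items.map pvG) := by cases d; cases h; rfl
  subst hd
  rw [PySem.Dict.getD_eq_get?_getD, PySem.Dict.getD_eq_get?_getD]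
  have := pv_get?_map st.items s
  cases hg : (PySem.Dict.mk st.items).get? s with
  | none => simp [hg] at this ⊢; simp [this, pvVal]
  | some v => simp [hg] at this ⊢; simp [this]

theorem pv_insert_map (st : PySem.Dict String (Int × Int)) (d : PySem.Dict String Int)
    (h : d.items = st.items.map pvG) (s : String) (v : Int × Int) :
    (d.insert s (pvVal v)).items = ((st.insert s v).items).map pvG := by
  have hd : d = PySem.Dict.mk (st.items.map pvG) := by cases d; cases h; rfl
  subst hd
  rw [PySem.Dict.items_insert, PySem.Dict.items_insert]
  rw [pv_contains_map]
  by_cases hc : (PySem.Dict.mk st.items).contains s = true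
  · simp only [hc, if_pos, List.map_map]
    apply List.map_congr_left
    intro p _
    by_cases hp : p.1 = s <;> simp [pvG, hp]
  · simp only [hc]
    simp [pvG]

-- the accumulation passes of A and B build pointwise-related dicts (same keys in the
-- same insertion order, B's value = pvVal of A's value)
theorem pv_fold_rel (msgs : List (List (String × String)))
    (st : PySem.Dict String (Int × Int)) (d : PySem.Dict String Int)
    (h : d.items = st.items.map pvG) :
    (msgs.foldl (fun d msg =>
        let s := ((PySem.Dict.mk msg).get? "sender").getD ""
        d.insert s (d.getD s 0 +
          (if PySem.Str.len (((PySem.Dict.mk msg).get? "text").getD "") > 50 then 3 else 1))) d).items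
      =
    ((msgs.foldl (fun st msg =>
        let s := ((PySem.Dict.mk msg).get? "sender").getD ""
        let st1 := st.modify s (0, 0) (fun p => (p.1 + 1, p.2))
        if PySem.Str.len (((PySem.Dict.mk msg).get? "text").getD "") > 50 then
          st1.modify s (0, 0) (fun p => (p.1, p.2 + 1))
        else st1) st).items).map pvG := by
  induction msgs generalizing st d with
  | nil => simpa using h
  | cons msg t ih =>
    simp only [List.foldl_cons]
    apply ih
    set s := ((PySem.Dict.mk msg).get? "sender").getD "" with hs
    have hget := pv_getD_map st d h s
    rcases hv : st.getD s (0, 0) with ⟨tt, ll⟩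
    by_cases hl : PySem.Str.len (((PySem.Dict.mk msg).get? "text").getD "") > 50
    · rw [if_pos hl, if_pos hl]
      have hm1 : st.modify s (0, 0) (fun p => (p.1 + 1, p.2)) = st.insert s (tt + 1, ll) := by
        rw [PySem.Dict.modify, hv]
      have hg1 : (st.insert s (tt + 1, ll)).getD s (0, 0) = (tt + 1, ll) :=
        PySem.Dict.getD_insert_self st s (tt + 1, ll) (0, 0)
      have hm2 : (st.insert s (tt + 1, ll)).modify s (0, 0) (fun p => (p.1, p.2 + 1))
          = (st.insert s (tt + 1, ll)).insert s (tt + 1, ll + 1) := by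
        rw [PySem.Dict.modify, hg1]
      rw [hm1, hm2]
      have h1 : (d.insert s (pvVal (tt + 1, ll))).items
          = ((st.insert s (tt + 1, ll)).items).map pvG := by
        exact pv_insert_map st d h s (tt + 1, ll)
      have h2 := pv_insert_map (st.insert s (tt + 1, ll))
        (d.insert s (pvVal (tt + 1, ll))) h1 s (tt + 1, ll + 1)
      -- B's single insert equals the composition of A's two inserts on the item lists
      have hval : d.getD s 0 + 3 = pvVal (tt + 1, ll + 1) := by
        rw [hget, hv]; simp [pvVal]; ring
      rw [hval]
      -- (d.insert s x).insert s y = d.insert s y when overwriting the same key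
      have hover : ((d.insert s (pvVal (tt + 1, ll))).insert s (pvVal (tt + 1, ll + 1))).items
          = (d.insert s (pvVal (tt + 1, ll + 1))).items := by
        rcases d with ⟨its⟩
        rw [PySem.Dict.items_insert, PySem.Dict.items_insert, PySem.Dict.items_insert]
        by_cases hc : (PySem.Dict.mk its).contains s = true
        · have hc2 : ((PySem.Dict.mk its).insert s (pvVal (tt + 1, ll))).contains s = true :=
            PySem.Dict.contains_insert_self _ _ _
          simp only [hc, hc2, if_pos, List.map_map]
          apply List.map_congr_left
          intro p _
          by_cases hp : p.1 = s <;> simp [hp]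
        · have hc2 : ((PySem.Dict.mk its).insert s (pvVal (tt + 1, ll))).contains s = true :=
            PySem.Dict.contains_insert_self _ _ _
          simp only [hc, hc2, if_pos, Bool.false_eq_true, if_false, List.map_append]
          have hkey : ∀ p ∈ its, (p.1 == s) = false := by
            intro p hp
            by_contra hpp
            apply hc
            simp only [PySem.Dict.contains]
            exact List.any_eq_true.mpr ⟨p, hp, by simpa using hpp⟩
          simp
          conv_rhs => rw [← List.map_id its]
          apply List.map_congr_left
          intro p hp
          have hne := hkey p hp
          simp at hne
          simp [hne]
      rw [← hover]
      exact h2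
    · rw [if_neg hl, if_neg hl]
      have hval : d.getD s 0 + 1 = pvVal (tt + 1, ll) := by
        rw [hget, hv]; simp [pvVal]; ring
      rw [hval]
      rw [PySem.Dict.modify, hv]
      exact pv_insert_map st d h s (tt + 1, ll)

-- length of insertBy
theorem pv_length_insertBy {α : Type} (before : α → α → Bool) (x : α) (ys : List α) :
    (PySem.List.insertBy before x ys).length = ys.length + 1 := by
  induction ys with
  | nil => rfl
  | cons y t ih =>
    rw [PySem.List.insertBy]
    by_cases h : before x y = true <;> simp [h, ih]

-- the top-2 scan of B tracks the first two elements of A's stable descending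
-- insertion sort, step by step
theorem pv_scan_sorted (l : List (String × Int)) (sc : String → Int)
    (hsc : ∀ p ∈ l, sc p.1 = p.2)
    (bs : String) (bv : Int) (sec : Option (String × Int)) (rest : List String)
    (hbv : bv = sc bs)
    (hsec : match sec with
            | none => rest = []
            | some (ss, sv) => rest.head? = some ss ∧ sv = sc ss) :
    let before : String → String → Bool := fun a b => decide (sc b < sc a)
    let acc' := (l.map (·.1)).foldl (fun a x => PySem.List.insertBy before x a) (bs :: rest)
    let r := l.foldl
      (fun (st : String × Int × Option (String × Int)) p =>
        if p.2 > st.2.1 then (p.1, p.2, some (st.1, st.2.1))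
        else
          match st.2.2 with
          | none => (st.1, st.2.1, some p)
          | some (_, sv) => if p.2 > sv then (st.1, st.2.1, some p) else st)
      (bs, bv, sec)
    ∃ rest', acc' = r.1 :: rest' ∧ r.2.1 = sc r.1 ∧
      (match r.2.2 with
       | none => rest' = []
       | some (ss, sv) => rest'.head? = some ss ∧ sv = sc ss) := by
  intro before
  induction l generalizing bs bv sec rest with
  | nil => exact ⟨rest, rfl, hbv, hsec⟩
  | cons p t ih =>
    have hp : sc p.1 = p.2 := hsc p (by simp)
    have hsc' : ∀ q ∈ t, sc q.1 = q.2 := fun q hq => hsc q (by simp [hq])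
    simp only [List.map_cons, List.foldl_cons]
    by_cases hgt : p.2 > bv
    · -- new best
      have hbefore : before p.1 bs = true := by
        simp [before, hp, hbv] at *; omega
      rw [PySem.List.insertBy, hbefore]
      simp only [if_pos hgt, if_true]
      exact ih hsc' p.1 p.2 (some (bs, bv)) (bs :: rest) hp.symm ⟨rfl, hbv⟩
    · have hbefore : before p.1 bs = false := by
        simp [before, hp, hbv] at *; omega
      rw [PySem.List.insertBy, hbefore]
      simp only [if_neg hgt, Bool.false_eq_true, if_false]
      cases sec with
      | none =>
        have hrest : rest = [] := hsec
        subst hrest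
        exact ih hsc' bs bv (some p) [p.1] hbv ⟨rfl, hp.symm⟩
      | some q =>
        rcases q with ⟨ss, sv⟩
        obtain ⟨hhead, hsv⟩ := hsec
        rcases rest with _ | ⟨r0, rest2⟩
        · simp at hhead
        · have hr0 : r0 = ss := by simpa using hhead
          subst hr0
          by_cases hgt2 : p.2 > sv
          · have hb2 : before p.1 r0 = true := by
              simp [before, hp, hsv] at *; omega
            rw [PySem.List.insertBy, hb2]
            simp only [if_pos hgt2, if_true]
            exact ih hsc' bs bv (some p) (p.1 :: r0 :: rest2) hbv ⟨rfl, hp.symm⟩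
          · have hb2 : before p.1 r0 = false := by
              simp [before, hp, hsv] at *; omega
            rw [PySem.List.insertBy, hb2]
            simp only [if_neg hgt2, Bool.false_eq_true, if_false]
            exact ih hsc' bs bv (some (r0, sv)) (r0 :: PySem.List.insertBy before p.1 rest2)
              hbv ⟨rfl, hsv⟩

-- every step of A's accumulation pass keeps the per-sender keys distinct
theorem pv_nodup (msgs : List (List (String × String))) (st : PySem.Dict String (Int × Int))
    (h : st.keys.Nodup) :
    (msgs.foldl (fun st msg =>
        let s := ((PySem.Dict.mk msg).get? "sender").getD ""
        let st1 := st.modify s (0, 0) (fun p => (p.1 + 1, p.2))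
        if PySem.Str.len (((PySem.Dict.mk msg).get? "text").getD "") > 50 then
          st1.modify s (0, 0) (fun p => (p.1, p.2 + 1))
        else st1) st).keys.Nodup := by
  induction msgs generalizing st with
  | nil => exact h
  | cons msg t ih =>
    simp only [List.foldl_cons]
    apply ih
    by_cases hl : PySem.Str.len (((PySem.Dict.mk msg).get? "text").getD "") > 50
    · rw [if_pos hl]
      exact PySem.Dict.nodup_keys_insert _ _ _ (PySem.Dict.nodup_keys_insert _ _ _ h)
    · rw [if_neg hl]
      exact PySem.Dict.nodup_keys_insert _ _ _ h

theorem pv_length_foldl_insertBy {α : Type} (before : α → α → Bool) (xs : List α) (acc : List α) :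
    (xs.foldl (fun a x => PySem.List.insertBy before x a) acc).length = acc.length + xs.length := by
  induction xs generalizing acc with
  | nil => rfl
  | cons x t ih => simp [ih, pv_length_insertBy]; omega

theorem pv_main (messages : List (List (String × String))) :
    identify_roles_py messages = identify_roles_py_alt messages := by
  unfold identify_roles_py identify_roles_py_alt
  have hrel := pv_fold_rel messages PySem.Dict.empty PySem.Dict.empty rfl
  have hnodup := pv_nodup messages PySem.Dict.empty PySem.Dict.nodup_keys_empty
  set sts : PySem.Dict String (Int × Int) := messages.foldl (fun st msg =>
      let s := ((PySem.Dict.mk msg).get? "sender").getD ""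
      let st1 := st.modify s (0, 0) (fun p => (p.1 + 1, p.2))
      if PySem.Str.len (((PySem.Dict.mk msg).get? "text").getD "") > 50 then
        st1.modify s (0, 0) (fun p => (p.1, p.2 + 1))
      else st1) PySem.Dict.empty with hsts
  set sco : PySem.Dict String Int := messages.foldl (fun d msg =>
      let s := ((PySem.Dict.mk msg).get? "sender").getD ""
      d.insert s (d.getD s 0 +
        (if PySem.Str.len (((PySem.Dict.mk msg).get? "text").getD "") > 50 then 3 else 1)))
      PySem.Dict.empty with hsco
  dsimp only
  -- A's derived scores dict is exactly B's accumulated dict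
  have hfresh : (sts.items.foldl (fun d p => d.insert p.1 (p.2.2 * 2 + p.2.1)) PySem.Dict.empty)
      = sco := by
    apply PySem.Dict.ext
    rw [PySem.Dict.items_foldl_insert_fresh sts.items (·.1) (fun p => p.2.2 * 2 + p.2.1)
      PySem.Dict.empty (fun a _ => PySem.Dict.contains_empty a.1) hnodup]
    rw [hrel]
    rfl
  have hkeys : sco.keys = sts.keys := by
    simp only [PySem.Dict.keys, hrel, List.map_map]
    rfl
  have hnodup2 : sco.keys.Nodup := by rw [hkeys]; exact hnodup
  have hlen : sts.keys.length = sco.items.length := by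
    rw [hrel]; simp [PySem.Dict.keys]
  rcases hitems : sco.items with _ | ⟨⟨k0, v0⟩, rest⟩
  · -- zero senders: both return ("", "")
    have : sts.keys = [] := by
      simp only [PySem.Dict.keys]
      rw [show sts.items = [] from by
        have := hrel; rw [hitems] at this; exact (List.map_eq_nil_iff.mp this.symm)]
      rfl
    simp [this, PySem.List.pyGetD, PySem.List.pyGet?, PySem.List.pyIdx?]
  · dsimp only
    have hsc : ∀ p ∈ sco.items, sco.getD p.1 0 = p.2 := by
      intro p hp
      exact PySem.Dict.getD_of_mem_items sco (by simpa using hp) hnodup2 0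
    have hk0 : v0 = sco.getD k0 0 := (hsc (k0, v0) (by rw [hitems]; simp)).symm
    by_cases hlt : sts.keys.length < 2
    · -- exactly one sender
      rw [if_pos hlt]
      have h2 : sco.items.length < 2 := hlen ▸ hlt
      rw [hitems] at h2
      have hr1 : rest = [] := by
        rcases rest with _ | ⟨q, t⟩
        · rfl
        · simp at h2
      subst hr1
      have hkeys1 : sts.keys = [k0] := by
        rw [← hkeys]
        simp only [PySem.Dict.keys, hitems]
        rfl
      simp [hkeys1, PySem.List.pyGetD, PySem.List.pyGet?, PySem.List.pyIdx?]
    · -- at least two senders: top-2 of the stable descending sort = the scan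
      rw [if_neg hlt]
      rw [hfresh, hkeys]
      rw [PySem.List.sorted_rev_eq_foldl_insertBy]
      have hkeyseq : sts.keys = k0 :: rest.map (·.1) := by
        rw [← hkeys]
        simp only [PySem.Dict.keys, hitems]
        rfl
      rw [hkeyseq]
      simp only [List.foldl_cons]
      have h0 : PySem.List.insertBy (fun a b => decide (sco.getD b 0 < sco.getD a 0)) k0 [] = [k0] := rfl
      rw [h0]
      have hsc' : ∀ p ∈ rest, sco.getD p.1 0 = p.2 := fun p hp => hsc p (by rw [hitems]; simp [hp])
      obtain ⟨rest', hacc, hbv, hsec⟩ := pv_scan_sorted rest (fun s => sco.getD s 0) hsc'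
        k0 v0 none [] hk0 rfl
      set r := rest.foldl
        (fun (st : String × Int × Option (String × Int)) p =>
          if p.2 > st.2.1 then (p.1, p.2, some (st.1, st.2.1))
          else
            match st.2.2 with
            | none => (st.1, st.2.1, some p)
            | some (_, sv) => if p.2 > sv then (st.1, st.2.1, some p) else st)
        (k0, v0, none) with hr
      rcases hsecv : r.2.2 with _ | ⟨ss, sv⟩
      · -- impossible: the sorted list would have length 1 but there are ≥ 2 senders
        exfalso
        rw [hsecv] at hsec
        have hlen2 := pv_length_foldl_insertBy
          (fun a b => decide (sco.getD b 0 < sco.getD a 0)) (rest.map (·.1)) [k0]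
        rw [hacc, hsec] at hlen2
        simp only [List.length_cons, List.length_nil, List.length_map] at hlen2
        have hlen3 : sts.keys.length = 1 + rest.length := by
          rw [hlen, hitems]; simp; omega
        omega
      · rw [hsecv] at hsec
        obtain ⟨hhead, _⟩ := hsec
        rcases rest' with _ | ⟨r1, rest2⟩
        · simp at hhead
        · have : r1 = ss := by simpa using hhead
          subst this
          rw [hacc]
          have hpos : (0:Int) ≤ (rest2.length:Int) + 1 := by positivity
          simp [PySem.List.pyGetD, PySem.List.pyGet?, PySem.List.pyIdx?, hpos]

-- ===== VERDICT (by name: the statement is the Claim_ definition above) =====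
theorem identify_roles_py_spec : Claim_equal_identify_roles_py := by
  intro messages _ _
  unfold Spec_identify_roles_py
  exact pv_main messages
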